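-- pv_equiv track=rewrite | github.com/zhusq20/reasoning-evals | arc_agi/playpen/test_answers/first.py | transform
-- ===== SOURCE A (Python) =====
-- def transform(grid_lst: list[list[int]]) -> list[list[int]]:
--     # Define the replication pattern for each input cell
--     replication_pattern = [
--         [[1, 0, 0], [0, 0, 0], [0, 0, 0]],  # Top-left
--         [[0, 1, 0], [1, 1, 1], [0, 1, 0]],  # Top-center
--         [[0, 0, 1], [0, 0, 0], [0, 0, 0]],  # Top-right
--         [[0, 1, 0], [0, 1, 0], [0, 0, 0]],  # Middle-left
--         [[1, 1, 1], [1, 1, 1], [1, 1, 1]],  # Middle-center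
--         [[0, 1, 0], [0, 1, 0], [0, 0, 0]],  # Middle-right
--         [[0, 0, 0], [0, 0, 0], [1, 0, 0]],  # Bottom-left
--         [[0, 0, 0], [0, 1, 0], [0, 1, 0]],  # Bottom-center
--         [[0, 0, 0], [0, 0, 0], [0, 0, 1]],  # Bottom-right
--     ]
--
--     output_grid = [[0 for _ in range(9)] for _ in range(9)]
--
--     for i in range(3):
--         for j in range(3):
--             cell_value = grid_lst[i][j]
--             pattern = replication_pattern[i * 3 + j]
--             for x in range(3):
--                 for y in range(3):
--                     if pattern[x][y] == 1:
--                         output_grid[i * 3 + x][j * 3 + y] = cell_value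
--
--     return output_grid
-- ===== SOURCE B (Python) =====
-- # Sparse alternative: the fixed patterns are flattened once into a list of the
-- # 24 active output coordinates; B writes only those cells into a zero grid,
-- # copying grid_lst[r // 3][c // 3], instead of scanning all 81 cells with
-- # per-block pattern lookups.
-- _ACTIVE = [
--     (0, 0), (0, 4), (0, 8),
--     (1, 3), (1, 4), (1, 5),
--     (2, 4),
--     (3, 1), (3, 3), (3, 4), (3, 5), (3, 7),
--     (4, 1), (4, 3), (4, 4), (4, 5), (4, 7),
--     (5, 3), (5, 4), (5, 5),
--     (7, 4),
--     (8, 0), (8, 4), (8, 8),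
-- ]
--
-- def transform(grid_lst: list[list[int]]) -> list[list[int]]:
--     out = [[0] * 9 for _ in range(9)]
--     for r, c in _ACTIVE:
--         out[r][c] = grid_lst[r // 3][c // 3]
--     return out
-- ===== Notes on version B (the rewrite author's own statement) =====
-- stated objective: alternative
-- what changed: Replaces the dense scan (nine 3x3 patterns, preallocated grid, four nested loops with a conditional write per cell) by a sparse representation: the patterns are flattened once into a list of the 24 active output coordinates and B performs one write per active point, out[r][c] = grid_lst[r//3][c//3].
import Mathlib
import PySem

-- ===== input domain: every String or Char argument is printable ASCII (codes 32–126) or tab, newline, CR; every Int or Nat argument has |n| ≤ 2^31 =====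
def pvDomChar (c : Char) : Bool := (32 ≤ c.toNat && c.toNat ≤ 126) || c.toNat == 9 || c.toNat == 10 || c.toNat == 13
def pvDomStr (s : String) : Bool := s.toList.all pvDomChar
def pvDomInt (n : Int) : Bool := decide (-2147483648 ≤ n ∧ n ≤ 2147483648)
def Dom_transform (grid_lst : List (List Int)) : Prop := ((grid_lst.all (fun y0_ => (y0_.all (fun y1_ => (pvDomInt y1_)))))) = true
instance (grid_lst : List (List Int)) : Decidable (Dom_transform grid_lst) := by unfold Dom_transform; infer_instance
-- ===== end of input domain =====

-- B flattens the nine 3x3 patterns into a sparse list of the 24 active output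
-- coordinates and writes only those cells (out[r][c] = grid[r/3][c/3]) into a zero grid.

-- ===== PORT A =====
-- list indexing grid_lst[i][j]: indices here are the literals 0..2/0..8, always
-- nonnegative; Pre_transform guarantees they are in range, so getD matches Python.
def transform (grid_lst : List (List Int)) : List (List Int) :=
  let replication_pattern : List (List (List Int)) :=
    [[[1, 0, 0], [0, 0, 0], [0, 0, 0]],
     [[0, 1, 0], [1, 1, 1], [0, 1, 0]],
     [[0, 0, 1], [0, 0, 0], [0, 0, 0]],
     [[0, 1, 0], [0, 1, 0], [0, 0, 0]],
     [[1, 1, 1], [1, 1, 1], [1, 1, 1]],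
     [[0, 1, 0], [0, 1, 0], [0, 0, 0]],
     [[0, 0, 0], [0, 0, 0], [1, 0, 0]],
     [[0, 0, 0], [0, 1, 0], [0, 1, 0]],
     [[0, 0, 0], [0, 0, 0], [0, 0, 1]]]
  let output_grid : List (List Int) := List.replicate 9 (List.replicate 9 0)
  (List.range 3).foldl (fun out i =>
    (List.range 3).foldl (fun out j =>
      let cell_value := (grid_lst.getD i []).getD j 0
      let pattern := replication_pattern.getD (i * 3 + j) []
      (List.range 3).foldl (fun out x =>
        (List.range 3).foldl (fun out y =>
          if (pattern.getD x []).getD y 0 == 1 then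
            out.modify (i * 3 + x) (fun row => row.set (j * 3 + y) cell_value)
          else out) out) out) out) output_grid

-- ===== PORT B =====
def pvActive : List (Nat × Nat) :=
  [(0, 0), (0, 4), (0, 8),
   (1, 3), (1, 4), (1, 5),
   (2, 4),
   (3, 1), (3, 3), (3, 4), (3, 5), (3, 7),
   (4, 1), (4, 3), (4, 4), (4, 5), (4, 7),
   (5, 3), (5, 4), (5, 5),
   (7, 4),
   (8, 0), (8, 4), (8, 8)]

def transform_alt (grid_lst : List (List Int)) : List (List Int) :=
  let out : List (List Int) := List.replicate 9 (List.replicate 9 0)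
  pvActive.foldl (fun out rc =>
    out.modify rc.1 (fun row => row.set rc.2 ((grid_lst.getD (rc.1 / 3) []).getD (rc.2 / 3) 0))) out

-- ===== PRECONDITION & SPEC =====
-- Pre_ excludes exactly the grids on which Python A raises IndexError:
-- fewer than 3 rows, or one of the first 3 rows shorter than 3.
def Pre_transform (grid_lst : List (List Int)) : Prop :=
  3 ≤ grid_lst.length ∧ ∀ row ∈ grid_lst.take 3, 3 ≤ row.length
instance (grid_lst : List (List Int)) : Decidable (Pre_transform grid_lst) := by
  unfold Pre_transform; infer_instance

def pvWitness_transform : List (List Int) := [[1, 2, 3], [4, 5, 6], [7, 8, 9]]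

def Spec_transform (grid_lst : List (List Int)) (out : List (List Int)) : Prop := out = transform_alt grid_lst
instance (grid_lst : List (List Int)) (out : List (List Int)) : Decidable (Spec_transform grid_lst out) := by unfold Spec_transform; infer_instance

-- ===== CLAIM (what is proved, stated in full; the proofs are below) =====
def Claim_equal_transform : Prop := ∀ (grid_lst : List (List Int)), Dom_transform grid_lst → Pre_transform grid_lst → Spec_transform grid_lst (transform grid_lst)

-- ===== LEMMAS AND PROOFS =====
theorem transform_A_core (a b c d e f g h i : Int)
    (t0 t1 t2 : List Int) (rest : List (List Int)) :
    transform ((a::b::c::t0)::(d::e::f::t1)::(g::h::i::t2)::rest)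
      =
  [[a,0,0,0,b,0,0,0,c],
   [0,0,0,b,b,b,0,0,0],
   [0,0,0,0,b,0,0,0,0],
   [0,d,0,e,e,e,0,f,0],
   [0,d,0,e,e,e,0,f,0],
   [0,0,0,e,e,e,0,0,0],
   [0,0,0,0,0,0,0,0,0],
   [0,0,0,0,h,0,0,0,0],
   [g,0,0,0,h,0,0,0,i]] := rfl

theorem transform_B_core (a b c d e f g h i : Int)
    (t0 t1 t2 : List Int) (rest : List (List Int)) :
    transform_alt ((a::b::c::t0)::(d::e::f::t1)::(g::h::i::t2)::rest)
      =
  [[a,0,0,0,b,0,0,0,c],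
   [0,0,0,b,b,b,0,0,0],
   [0,0,0,0,b,0,0,0,0],
   [0,d,0,e,e,e,0,f,0],
   [0,d,0,e,e,e,0,f,0],
   [0,0,0,e,e,e,0,0,0],
   [0,0,0,0,0,0,0,0,0],
   [0,0,0,0,h,0,0,0,0],
   [g,0,0,0,h,0,0,0,i]] := rfl

theorem transform_eq_core (a b c d e f g h i : Int)
    (t0 t1 t2 : List Int) (rest : List (List Int)) :
    transform ((a::b::c::t0)::(d::e::f::t1)::(g::h::i::t2)::rest)
      = transform_alt ((a::b::c::t0)::(d::e::f::t1)::(g::h::i::t2)::rest) := by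
  rw [transform_A_core, transform_B_core]

-- ===== VERDICT (by name: the statement is the Claim_ definition above) =====
theorem transform_spec : Claim_equal_transform := by
  intro g _ hpre
  obtain ⟨hlen, hrows⟩ := hpre
  match g, hlen with
  | (r0::r1::r2::rest), _ =>
    have h0 := hrows r0 (by simp)
    have h1 := hrows r1 (by simp)
    have h2 := hrows r2 (by simp)
    match r0, h0 with
    | (a::b::c::t0), _ =>
      match r1, h1 with
      | (d::e::f::t1), _ =>
        match r2, h2 with
        | (g::h::i::t2), _ =>
          exact transform_eq_core a b c d e f g h i t0 t1 t2 rest
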